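-- pv_equiv track=rewrite | github.com/Rodrigosnrocha/INF1031-Projeto-Final | PROJ_PYGAME_AV09.py | generateQuads
-- ===== SOURCE A (Python) =====
-- def generateQuads(x,y):
--     tile_groups = []
--     for h in range(3):
--         tile_quads = []
--         for i in range(x):
--             for j in range(y):
--                 tile_quads.append((i * tile_size , j * tile_size + h*group_size, tile_size, tile_size))
--         tile_groups.append(tile_quads)
--     return tile_groups
--
-- tile_size = 64
--
-- group_size = tile_size * 4
-- ===== SOURCE B (Python) =====
-- tile_size = 64
-- group_size = tile_size * 4
--
-- def generateQuads(x, y):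
--     # Build the h=0 base group once, then derive the other groups by a y-offset translation.
--     base = [(i * tile_size, j * tile_size, tile_size, tile_size)
--             for i in range(x) for j in range(y)]
--     return [[(a, b + h * group_size, c, d) for (a, b, c, d) in base]
--             for h in range(3)]
-- ===== Notes on version B (the rewrite author's own statement) =====
-- stated objective: alternative
-- what changed: B runs the nested i,j loops only once to build the h=0 base group and derives the other two groups by mapping a y-offset translation over it, instead of re-running the nested loops for each h; cost is the same since the output itself is 3*x*y tuples.
import Mathlib
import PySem

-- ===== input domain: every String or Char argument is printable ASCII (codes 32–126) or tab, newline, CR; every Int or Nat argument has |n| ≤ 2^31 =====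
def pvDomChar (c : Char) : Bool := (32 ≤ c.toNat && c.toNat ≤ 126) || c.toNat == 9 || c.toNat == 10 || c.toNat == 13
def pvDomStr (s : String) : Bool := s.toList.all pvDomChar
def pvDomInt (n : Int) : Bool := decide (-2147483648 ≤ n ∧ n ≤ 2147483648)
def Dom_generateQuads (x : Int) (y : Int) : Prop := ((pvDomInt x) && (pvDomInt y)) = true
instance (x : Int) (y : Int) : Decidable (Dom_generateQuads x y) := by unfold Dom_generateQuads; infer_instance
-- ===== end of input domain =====

-- B builds the h=0 base group once and derives the other two groups by mapping a
-- y-offset translation over it, instead of re-running the nested loops for each h.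

-- ===== PORT A =====
def generateQuads (x : Int) (y : Int) : List (List (Int × Int × Int × Int)) :=
  (PySem.List.pyRange 0 3 1).foldl (fun tile_groups h =>
    tile_groups ++ [
      (PySem.List.pyRange 0 x 1).foldl (fun tile_quads i =>
        (PySem.List.pyRange 0 y 1).foldl (fun tq j =>
          tq ++ [(i * 64, j * 64 + h * 256, 64, 64)]) tile_quads) [] ]) []

-- ===== PORT B =====
def quadsBase (x : Int) (y : Int) : List (Int × Int × Int × Int) :=
  (PySem.List.pyRange 0 x 1).flatMap (fun i =>
    (PySem.List.pyRange 0 y 1).map (fun j => (i * 64, j * 64, 64, 64)))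

def generateQuads_alt (x : Int) (y : Int) : List (List (Int × Int × Int × Int)) :=
  (PySem.List.pyRange 0 3 1).map (fun h =>
    (quadsBase x y).map (fun q => (q.1, q.2.1 + h * 256, q.2.2.1, q.2.2.2)))

-- ===== PRECONDITION & SPEC =====
def Spec_generateQuads (x : Int) (y : Int) (out : List (List (Int × Int × Int × Int))) : Prop := out = generateQuads_alt x y
instance (x : Int) (y : Int) (out : List (List (Int × Int × Int × Int))) : Decidable (Spec_generateQuads x y out) := by unfold Spec_generateQuads; infer_instance

-- ===== CLAIM (what is proved, stated in full; the proofs are below) =====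
def Claim_equal_generateQuads : Prop := ∀ (x : Int) (y : Int), Dom_generateQuads x y → Spec_generateQuads x y (generateQuads x y)

-- ===== LEMMAS AND PROOFS =====
theorem group_eq (x y h : Int) :
    (PySem.List.pyRange 0 x 1).foldl (fun tile_quads i =>
        (PySem.List.pyRange 0 y 1).foldl (fun tq j =>
          tq ++ [(i * 64, j * 64 + h * 256, 64, 64)]) tile_quads) [] =
    (quadsBase x y).map (fun q => (q.1, q.2.1 + h * 256, q.2.2.1, q.2.2.2)) := by
  simp only [PySem.List.foldl_append_singleton_eq_map]
  rw [PySem.List.foldl_append_eq_flatMap]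
  simp [quadsBase, List.map_flatMap, Function.comp_def]

-- ===== VERDICT (by name: the statement is the Claim_ definition above) =====
theorem generateQuads_spec : Claim_equal_generateQuads := by
  intro x y _
  show generateQuads x y = generateQuads_alt x y
  unfold generateQuads generateQuads_alt
  simp only [group_eq x y]
  rw [PySem.List.foldl_append_singleton_eq_map]
  simp
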